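-- pv_equiv track=rewrite | github.com/Ayush-Prabhu/Compiler-Explorer | compiler-explorer.py | segment_diff
-- ===== SOURCE A (Python) =====
-- def segment_diff(diff):
--     sections = {"All": diff}
--     keyword_map = { "Dead Code": ["eliminate", "unused", "dce"], "Inlining": ["inline"], "Constant Folding": ["fold", "constant"], "Loop": ["loop", "unroll"], "Strength": ["strength"], "Reordering": ["reorder"] }
--     for line in diff:
--         matched = False
--         for sec, kws in keyword_map.items():
--             if any(k in line.lower() for k in kws): sections.setdefault(sec, []).append(line); matched=True
--         if not matched: sections.setdefault("Misc", []).append(line)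
--     return sections
-- ===== SOURCE B (Python) =====
-- def segment_diff(diff):
--     keyword_map = { "Dead Code": ["eliminate", "unused", "dce"], "Inlining": ["inline"], "Constant Folding": ["fold", "constant"], "Loop": ["loop", "unroll"], "Strength": ["strength"], "Reordering": ["reorder"] }
--
--     def secs_of(line):
--         low = line.lower()
--         hits = [sec for sec, kws in keyword_map.items() if any(k in low for k in kws)]
--         return hits if hits else ["Misc"]
--
--     tags = [secs_of(line) for line in diff]
--     order = ["All"]
--     for ts in tags:
--         for sec in ts:
--             if sec not in order:
--                 order.append(sec)
--     return {sec: diff if sec == "All" else [l for l, ts in zip(diff, tags) if sec in ts] for sec in order}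
-- ===== Notes on version B (the rewrite author's own statement) =====
-- stated objective: alternative
-- what changed: Transposed structure: instead of a per-line loop mutating a dict with setdefault/append, B lower-cases each line once, tags every line with its matching sections, derives the key order by deduplication, and builds each section's line list by a per-section filter in a dict comprehension.
import Mathlib
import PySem

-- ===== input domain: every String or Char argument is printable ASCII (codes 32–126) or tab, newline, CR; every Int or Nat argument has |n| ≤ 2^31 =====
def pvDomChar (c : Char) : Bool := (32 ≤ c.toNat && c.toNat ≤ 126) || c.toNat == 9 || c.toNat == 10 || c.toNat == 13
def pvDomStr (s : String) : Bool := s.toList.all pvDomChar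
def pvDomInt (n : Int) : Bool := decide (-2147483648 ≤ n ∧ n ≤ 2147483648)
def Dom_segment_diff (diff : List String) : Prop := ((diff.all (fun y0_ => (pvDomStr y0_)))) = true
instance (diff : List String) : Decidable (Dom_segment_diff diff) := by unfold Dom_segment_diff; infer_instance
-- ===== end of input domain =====

-- B restructures A: one tagging pass per line, key order by deduplication, then per-section filters (alternative decomposition, same cost).

-- ===== PORT A =====
-- the keyword table, a literal constant shared verbatim by both sources
def pvKeywordMap : List (String × List String) :=
  [("Dead Code", ["eliminate", "unused", "dce"]), ("Inlining", ["inline"]),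
   ("Constant Folding", ["fold", "constant"]), ("Loop", ["loop", "unroll"]),
   ("Strength", ["strength"]), ("Reordering", ["reorder"])]

def segment_diff (diff : List String) : List (String × List String) :=
  let sections : PySem.Dict String (List String) := PySem.Dict.empty.insert "All" diff
  let final := diff.foldl (fun sections line =>
    -- matched = False; for sec, kws in keyword_map.items(): …
    let r := pvKeywordMap.foldl
      (fun (p : PySem.Dict String (List String) × Bool) skws =>
        if skws.2.any (fun k => PySem.Str.isIn k (PySem.Str.lower line)) then
          (p.1.modify skws.1 [] (· ++ [line]), true)   -- sections.setdefault(sec, []).append(line)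
        else p)
      (sections, false)
    if r.2 then r.1 else r.1.modify "Misc" [] (· ++ [line])) sections
  final.items

-- ===== PORT B =====
def pvSecsOf (line : String) : List String :=
  let low := PySem.Str.lower line
  let hits := (pvKeywordMap.filter (fun skws => skws.2.any (fun k => PySem.Str.isIn k low))).map (·.1)
  if hits = [] then ["Misc"] else hits

def segment_diff_alt (diff : List String) : List (String × List String) :=
  let tags := diff.map pvSecsOf
  let order := tags.foldl (fun o ts =>
    ts.foldl (fun o sec => if sec ∈ o then o else o ++ [sec]) o) ["All"]
  -- the final dict comprehension over 'order'
  (order.foldl (fun (d : PySem.Dict String (List String)) sec =>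
      d.insert sec (if sec = "All" then diff
        else ((diff.zip tags).filter (fun p => decide (sec ∈ p.2))).map (·.1)))
    PySem.Dict.empty).items

-- ===== PRECONDITION & SPEC =====
def Spec_segment_diff (diff : List String) (out : List (String × List String)) : Prop := out = segment_diff_alt diff
instance (diff : List String) (out : List (String × List String)) : Decidable (Spec_segment_diff diff out) := by unfold Spec_segment_diff; infer_instance

-- ===== CLAIM (what is proved, stated in full; the proofs are below) =====
def Claim_equal_segment_diff : Prop := ∀ (diff : List String), Dom_segment_diff diff → Spec_segment_diff diff (segment_diff diff)

-- ===== LEMMAS AND PROOFS =====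

theorem pv_foldl_flatMap {α β γ : Type} (l : List α) (f : α → List β) (g : γ → β → γ) (i : γ) :
    (l.flatMap f).foldl g i = l.foldl (fun a x => (f x).foldl g a) i := by
  induction l generalizing i with
  | nil => rfl
  | cons x xs ih => simp [List.flatMap_cons, List.foldl_append, ih]

theorem pv_zip_map_right {α β : Type} (l : List α) (f : α → β) :
    l.zip (l.map f) = l.map (fun x => (x, f x)) := by
  induction l with
  | nil => rfl
  | cons x xs ih => simp [ih]

-- the matched-flag fold over the keyword table, solved in one statement
theorem pv_foldl_pairbool (L : List (String × List String)) (c : String × List String → Bool)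
    (line : String) (d : PySem.Dict String (List String)) (b : Bool) :
    L.foldl (fun p skws => if c skws then (p.1.modify skws.1 [] (· ++ [line]), true) else p) (d, b)
    = (((L.filter c).map (·.1)).foldl (fun d sec => d.modify sec [] (· ++ [line])) d, b || L.any c) := by
  induction L generalizing d b with
  | nil => simp
  | cons x xs ih =>
    by_cases h : c x = true
    · simp [h, ih]
    · simp [h, ih, Bool.false_or]

theorem pv_secsOf_nodup (line : String) : (pvSecsOf line).Nodup := by
  simp only [pvSecsOf]
  split
  · simp
  · have hsub : ((pvKeywordMap.filter (fun skws => skws.2.any fun k => PySem.Str.isIn k (PySem.Str.lower line))).map (fun p => p.1)).Sublist (pvKeywordMap.map (fun p => p.1)) :=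
      List.Sublist.map _ List.filter_sublist
    exact (by simp [pvKeywordMap] : (pvKeywordMap.map (fun p => p.1)).Nodup).sublist hsub

theorem pv_all_not_mem_secsOf (line : String) : "All" ∉ pvSecsOf line := by
  simp only [pvSecsOf]
  split
  · simp
  · intro h
    have hsub : ((pvKeywordMap.filter (fun skws => skws.2.any fun k => PySem.Str.isIn k (PySem.Str.lower line))).map (fun p => p.1)).Sublist (pvKeywordMap.map (fun p => p.1)) :=
      List.Sublist.map _ List.filter_sublist
    have : "All" ∈ pvKeywordMap.map (fun p => p.1) := hsub.subset h
    simp [pvKeywordMap] at this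

-- A's per-line step is the fold of setdefault-append over pvSecsOf line
theorem pv_line_step (d : PySem.Dict String (List String)) (line : String) :
    (let r := pvKeywordMap.foldl
      (fun (p : PySem.Dict String (List String) × Bool) skws =>
        if skws.2.any (fun k => PySem.Str.isIn k (PySem.Str.lower line)) then
          (p.1.modify skws.1 [] (· ++ [line]), true)
        else p)
      (d, false)
    if r.2 then r.1 else r.1.modify "Misc" [] (· ++ [line]))
    = (pvSecsOf line).foldl (fun d sec => d.modify sec [] (· ++ [line])) d := by
  rw [pv_foldl_pairbool]
  by_cases h : pvKeywordMap.any (fun skws => skws.2.any (fun k => PySem.Str.isIn k (PySem.Str.lower line))) = true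
  · have hne : (pvKeywordMap.filter (fun skws => skws.2.any (fun k => PySem.Str.isIn k (PySem.Str.lower line)))).map (·.1) ≠ [] := by
      simp only [ne_eq, List.map_eq_nil_iff, List.filter_eq_nil_iff]
      rw [List.any_eq_true] at h
      obtain ⟨x, hx, hcx⟩ := h
      intro hall; exact absurd hcx (by simpa using hall x hx)
    simp only [h, Bool.false_or, pvSecsOf, if_neg hne]
    simp
  · have hb : pvKeywordMap.any (fun skws => skws.2.any (fun k => PySem.Str.isIn k (PySem.Str.lower line))) = false := by
      simpa using h
    have hnil : (pvKeywordMap.filter (fun skws => skws.2.any (fun k => PySem.Str.isIn k (PySem.Str.lower line)))) = [] := by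
      rw [List.filter_eq_nil_iff]
      intro x hx
      rw [List.any_eq_false] at hb
      exact hb x hx
    simp only [hb, hnil, Bool.false_or, List.map_nil, List.foldl_nil, if_neg (by decide : ¬ (false = true)), pvSecsOf]
    simp

-- the per-line match-list fold, flattened to (section, line) pairs
theorem pv_pairs_filter (diff : List String) (c : String) :
    ((diff.flatMap (fun l => (pvSecsOf l).map (fun s => (s, l)))).filter (fun q => q.1 == c)).map (·.2)
    = diff.filter (fun l => decide (c ∈ pvSecsOf l)) := by
  induction diff with
  | nil => rfl
  | cons l ls ih =>
    have key : ∀ (S : List String), S.Nodup →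
        (((S.map (fun s => (s, l))).filter (fun q => q.1 == c)).map (·.2)) = if c ∈ S then [l] else [] := by
      intro S hS
      induction S with
      | nil => simp
      | cons s S ihS =>
        rcases List.nodup_cons.mp hS with ⟨hns, hS'⟩
        by_cases hsc : s = c
        · subst hsc
          simp [ihS hS', if_neg hns]
        · have : (s == c) = false := by simpa using hsc
          simp only [List.map_cons, List.filter_cons, this, Bool.false_eq_true, if_neg (by decide : ¬ False)]
          rw [ihS hS']
          simp [List.mem_cons, Ne.symm hsc]
    simp only [List.flatMap_cons, List.filter_append, List.map_append, List.filter_cons, ih,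
      key (pvSecsOf l) (pv_secsOf_nodup l)]
    by_cases hc : c ∈ pvSecsOf l <;> simp [hc]

theorem segment_diff_spec : Claim_equal_segment_diff := by
  intro diff _
  unfold Spec_segment_diff segment_diff segment_diff_alt
  simp only []
  -- step 1: A's dict equals a single flat fold over (section, line) pairs
  have hA : (diff.foldl (fun sections line =>
      let r := pvKeywordMap.foldl
        (fun (p : PySem.Dict String (List String) × Bool) skws =>
          if skws.2.any (fun k => PySem.Str.isIn k (PySem.Str.lower line)) then
            (p.1.modify skws.1 [] (· ++ [line]), true)
          else p)
        (sections, false)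
      if r.2 then r.1 else r.1.modify "Misc" [] (· ++ [line]))
      (PySem.Dict.empty.insert "All" diff))
      = ((diff.flatMap (fun l => (pvSecsOf l).map (fun s => (s, l)))).foldl
          (fun d q => d.modify q.1 [] (· ++ [q.2])) (PySem.Dict.empty.insert "All" diff)) := by
    rw [pv_foldl_flatMap]
    apply List.foldl_ext
    intro d line _
    rw [List.foldl_map]
    simpa using pv_line_step d line
  rw [hA]
  have hnodup0 : (PySem.Dict.empty.insert "All" diff : PySem.Dict String (List String)).keys = ["All"] := rfl
  have hkeys : ((diff.flatMap (fun l => (pvSecsOf l).map (fun s => (s, l)))).foldl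
      (fun d q => d.modify q.1 [] (· ++ [q.2])) (PySem.Dict.empty.insert "All" diff)).keys
      = PySem.Set.update ["All"] ((diff.flatMap (fun l => (pvSecsOf l).map (fun s => (s, l)))).map (fun q => q.1)) := by
    rw [PySem.Dict.keys_foldl_modify_key, hnodup0]
  have hfst : ((diff.flatMap (fun l => (pvSecsOf l).map (fun s => (s, l)))).map (fun q => q.1))
      = diff.flatMap pvSecsOf := by
    simp [List.map_flatMap, List.map_map, Function.comp_def]
  have horder : (diff.map pvSecsOf).foldl (fun o ts =>
      ts.foldl (fun o sec => if sec ∈ o then o else o ++ [sec]) o) ["All"]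
      = PySem.Set.update ["All"] (diff.flatMap pvSecsOf) := by
    have hadd : (fun (o : List String) sec => if sec ∈ o then o else o ++ [sec])
        = fun o sec => PySem.Set.add o sec := by
      funext o sec
      rw [PySem.Set.add_eq_ite]
    have hupd : PySem.Set.update ["All"] (diff.flatMap pvSecsOf)
        = (diff.flatMap pvSecsOf).foldl (fun s b => PySem.Set.add s b) ["All"] := by
      have h := PySem.Set.update_map_eq_foldl_add (s := ["All"]) (l := diff.flatMap pvSecsOf) (f := id)
      simpa using h
    rw [hadd, hupd, pv_foldl_flatMap, List.foldl_map]
  have hnodupKeys : ((diff.flatMap (fun l => (pvSecsOf l).map (fun s => (s, l)))).foldl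
      (fun d q => d.modify q.1 [] (· ++ [q.2])) (PySem.Dict.empty.insert "All" diff)).keys.Nodup := by
    rw [hkeys]
    apply PySem.Set.nodup_update
    exact List.nodup_singleton _
  have hgetD : ∀ c, ((diff.flatMap (fun l => (pvSecsOf l).map (fun s => (s, l)))).foldl
      (fun d q => d.modify q.1 [] (· ++ [q.2])) (PySem.Dict.empty.insert "All" diff)).getD c []
      = (PySem.Dict.empty.insert "All" diff : PySem.Dict String (List String)).getD c []
        ++ ((diff.flatMap (fun l => (pvSecsOf l).map (fun s => (s, l)))).filter (fun q => q.1 == c)).map (·.2) := by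
    intro c
    exact PySem.Dict.getD_foldl_modify_append _ _ _
  -- B's dict comprehension: fresh distinct keys, items append in order
  have hBitems : ((((diff.map pvSecsOf).foldl (fun o ts =>
        ts.foldl (fun o sec => if sec ∈ o then o else o ++ [sec]) o) ["All"]).foldl
        (fun (d : PySem.Dict String (List String)) sec =>
          d.insert sec (if sec = "All" then diff
            else ((diff.zip (diff.map pvSecsOf)).filter (fun p => decide (sec ∈ p.2))).map (·.1)))
        PySem.Dict.empty).items)
      = ((diff.map pvSecsOf).foldl (fun o ts =>
        ts.foldl (fun o sec => if sec ∈ o then o else o ++ [sec]) o) ["All"]).map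
          (fun sec => (sec, if sec = "All" then diff
            else ((diff.zip (diff.map pvSecsOf)).filter (fun p => decide (sec ∈ p.2))).map (·.1))) := by
    have := PySem.Dict.items_foldl_insert_fresh
      (l := (diff.map pvSecsOf).foldl (fun o ts =>
        ts.foldl (fun o sec => if sec ∈ o then o else o ++ [sec]) o) ["All"])
      (k := fun sec => sec)
      (v := fun sec => if sec = "All" then diff
            else ((diff.zip (diff.map pvSecsOf)).filter (fun p => decide (sec ∈ p.2))).map (·.1))
      (d := PySem.Dict.empty)
      (by intro a _; exact PySem.Dict.contains_empty _)
      (by rw [List.map_id_fun']; rw [horder]; apply PySem.Set.nodup_update; exact List.nodup_singleton _)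
    simpa using this
  rw [hBitems]
  rw [PySem.Dict.items_eq_map_keys _ hnodupKeys []]
  rw [hkeys, hfst, horder]
  apply List.map_congr_left
  intro k hk
  rw [hgetD k]
  by_cases hkAll : k = "All"
  · subst hkAll
    have hfilterAll : ((diff.flatMap (fun l => (pvSecsOf l).map (fun s => (s, l)))).filter (fun q => q.1 == "All")).map (·.2) = [] := by
      rw [pv_pairs_filter]
      rw [List.filter_eq_nil_iff]
      intro l _
      simpa using pv_all_not_mem_secsOf l
    rw [hfilterAll]
    simp [PySem.Dict.getD_insert_self]
  · rw [if_neg hkAll]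
    have h0 : (PySem.Dict.empty.insert "All" diff : PySem.Dict String (List String)).getD k [] = [] := by
      rw [PySem.Dict.getD_insert]
      rw [if_neg hkAll]
      exact PySem.Dict.getD_empty _ _
    rw [h0, List.nil_append, pv_pairs_filter]
    rw [pv_zip_map_right]
    rw [List.filter_map, List.map_map]
    simp [Function.comp_def]

-- ===== VERDICT (by name: the statement is the Claim_ definition above) =====
-- (the theorem segment_diff_spec above IS the verdict)
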